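-- pv_equiv track=rewrite | github.com/himudigonda/leetcode | Array/medium/4224-find-the-score-difference-in-a-game/find-the-score-difference-in-a-game.py | scoreDifference
-- ===== SOURCE A (Python) =====
-- from typing import List
--
-- def scoreDifference(nums: List[int]) -> int:
--     # player1 = 0
--     # player2 = 0
--     # player1flag = True
--     # player2flag = False
--
--     # for idx, val in enumerate(nums):
--     #     if idx % 6 == 5:
--     #         player1flag = not player1flag
--     #         player2flag = not player2flag
--     #     if val % 2 == 1:
--     #         player1flag = not player1flag
--     #         player2flag = not player2flag
--     #     player1 += val if player1flag else 0
--     #     player2 += val if player2flag else 0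
--     # return player1 - player2
--
--     scores = [0, 0]
--     active = True
--
--     for idx, val in enumerate(nums):
--         if val % 2:
--             active = not active
--         if idx % 6 == 5:
--             active = not active
--
--         if active:
--             scores[0] += val
--         else:
--             scores[1] += val
--
--     return scores[0] - scores[1]
-- ===== SOURCE B (Python) =====
-- from typing import List
--
-- def scoreDifference(nums: List[int]) -> int:
--     # Backward scan: no toggle state at all. For each position, exactly one of
--     # "val is odd" / "idx % 6 == 5" flips the side the value (and the whole
--     # suffix) is attributed to; flipping the entry side negates the suffix's
--     # score difference, so the difference satisfies the local recurrence
--     # total = -v - total on a flip, v + total otherwise.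
--     total = 0
--     for i, v in reversed(list(enumerate(nums))):
--         if (v % 2 == 1) != (i % 6 == 5):
--             total = -v - total
--         else:
--             total = v + total
--     return total
-- ===== Notes on version B (the rewrite author's own statement) =====
-- stated objective: alternative
-- what changed: Replaces A's forward stateful loop (active-flag toggle plus two score buckets) by a stateless backward scan: each element either adds to or negates-and-subtracts from the suffix's score difference, exploiting that flipping the entry side negates the whole suffix difference.
import Mathlib
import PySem

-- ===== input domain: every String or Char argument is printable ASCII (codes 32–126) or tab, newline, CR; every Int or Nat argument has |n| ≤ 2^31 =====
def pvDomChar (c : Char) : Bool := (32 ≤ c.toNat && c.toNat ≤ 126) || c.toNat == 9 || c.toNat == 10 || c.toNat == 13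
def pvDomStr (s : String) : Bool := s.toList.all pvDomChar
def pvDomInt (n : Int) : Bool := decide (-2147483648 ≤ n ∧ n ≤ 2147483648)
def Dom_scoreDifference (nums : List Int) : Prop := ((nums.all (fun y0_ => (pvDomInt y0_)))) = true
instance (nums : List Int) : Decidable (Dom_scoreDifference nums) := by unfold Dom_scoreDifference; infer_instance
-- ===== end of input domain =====

-- B replaces A's forward toggle-and-two-buckets loop by a stateless backward scan using the
-- negation symmetry of the suffix score difference (objective: alternative, same O(n) cost).

-- ===== PORT A =====
def scoreDifference (nums : List Int) : Int :=
  let st := (PySem.List.enumerate nums).foldl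
    (fun (st : Int × Int × Bool) p =>
      let a1 := if PySem.Int.mod p.2 2 ≠ 0 then !st.2.2 else st.2.2
      let a2 := if PySem.Int.mod p.1 6 = 5 then !a1 else a1
      if a2 then (st.1 + p.2, st.2.1, a2) else (st.1, st.2.1 + p.2, a2))
    (0, 0, true)
  st.1 - st.2.1

-- ===== PORT B =====
def scoreDifference_alt (nums : List Int) : Int :=
  (PySem.List.enumerate nums).reverse.foldl
    (fun (total : Int) p =>
      if (PySem.Int.mod p.2 2 == 1) != (PySem.Int.mod p.1 6 == 5) then -p.2 - total
      else p.2 + total) 0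

-- ===== PRECONDITION & SPEC =====
def Spec_scoreDifference (nums : List Int) (out : Int) : Prop := out = scoreDifference_alt nums
instance (nums : List Int) (out : Int) : Decidable (Spec_scoreDifference nums out) := by unfold Spec_scoreDifference; infer_instance

-- ===== CLAIM =====
def Claim_equal_scoreDifference : Prop := ∀ (nums : List Int), Dom_scoreDifference nums → Spec_scoreDifference nums (scoreDifference nums)

-- ===== LEMMAS AND PROOFS =====

/-- B's backward recurrence as a structural function: the score difference of the suffix
starting at absolute index `s`, entered with the positive side active. -/
def pvG : List Int → Int → Int
  | [], _ => 0
  | v :: rest, s =>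
    if (PySem.Int.mod v 2 == 1) != (PySem.Int.mod s 6 == 5)
    then -v - pvG rest (s + 1) else v + pvG rest (s + 1)

lemma pvAlt_eq (xs : List Int) : ∀ (s : Int),
    ((PySem.List.enumerate xs s).reverse.foldl
      (fun (total : Int) p =>
        if (PySem.Int.mod p.2 2 == 1) != (PySem.Int.mod p.1 6 == 5) then -p.2 - total
        else p.2 + total) 0) = pvG xs s := by
  induction xs with
  | nil => intro s; simp [PySem.List.enumerate_nil, pvG]
  | cons v rest ih =>
    intro s
    rw [PySem.List.enumerate_cons]
    simp only [List.reverse_cons, List.foldl_append, List.foldl_cons, List.foldl_nil, pvG, ih]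

theorem pvMain (xs : List Int) : ∀ (s p1 p2 : Int) (b : Bool),
    (let st := (PySem.List.enumerate xs s).foldl
      (fun (st : Int × Int × Bool) p =>
        let a1 := if PySem.Int.mod p.2 2 ≠ 0 then !st.2.2 else st.2.2
        let a2 := if PySem.Int.mod p.1 6 = 5 then !a1 else a1
        if a2 then (st.1 + p.2, st.2.1, a2) else (st.1, st.2.1 + p.2, a2))
      (p1, p2, b)
     st.1 - st.2.1)
    = (p1 - p2) + (if b then pvG xs s else -pvG xs s) := by
  induction xs with
  | nil => intro s p1 p2 b; cases b <;> simp [PySem.List.enumerate_nil, pvG]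
  | cons v rest ih =>
    intro s p1 p2 b
    have hm : PySem.Int.mod v 2 = v % 2 := PySem.Int.mod_eq_emod_of_pos (by omega)
    have h2 : v % 2 = 0 ∨ v % 2 = 1 := Int.emod_two_eq v
    have h6m : PySem.Int.mod s 6 = s % 6 := PySem.Int.mod_eq_emod_of_pos (by omega)
    rw [PySem.List.enumerate_cons]
    simp only [List.foldl_cons, pvG, hm, h6m]
    by_cases h6 : s % 6 = 5 <;> rcases h2 with hodd | hodd <;> cases b <;>
      simp only [h6, hodd] <;> rw [ih] <;> simp [h6] <;> ring
-- ===== VERDICT =====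
theorem scoreDifference_spec : Claim_equal_scoreDifference := by
  intro nums _
  show scoreDifference nums = scoreDifference_alt nums
  unfold scoreDifference scoreDifference_alt
  rw [pvAlt_eq nums 0]
  simpa using pvMain nums 0 0 0 true
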